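-- pv_equiv track=rewrite | github.com/bordasa/LS_py110_lesson1 | lesson_1/most_adjacent_consonants.py | sort_by_consonant_count
-- ===== SOURCE A (Python) =====
-- def count_max_adjacent_consonants(my_string):
--     no_spaces = my_string.replace(' ', '')
--
--     adj_consonant_tracker = []
--     max_num_adj_consonants = 0
--
--     for char in no_spaces:
--         if char not in ['a', 'e', 'i', 'o', 'u', 'y']:
--             adj_consonant_tracker.append(char)
--             max_num_adj_consonants = len(adj_consonant_tracker)
--
--         else:
--             if len(adj_consonant_tracker) > max_num_adj_consonants:
--                 max_num_adj_consonants = len(adj_consonant_tracker)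
--
--             adj_consonant_tracker.clear()
--
--     if max_num_adj_consonants > 1:
--         return max_num_adj_consonants
--     else:
--         return 0
--
-- def sort_by_consonant_count(my_list):
--
--     tracking_list = []
--
--     for string in my_list:
--         max_adj_cons = count_max_adjacent_consonants(string)
--         tracking_list.append((max_adj_cons, string))
--
--     final_list = []
--     max_adj_cons_tracker = -1
--
--     while tracking_list:
--         for item in tracking_list:
--             if item[0] > max_adj_cons_tracker:
--                 word_to_add = item[1]
--                 max_adj_cons_tracker = item[0]
--
--         final_list.append(word_to_add)
--         tracking_list.remove((max_adj_cons_tracker, word_to_add))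
--         max_adj_cons_tracker = -1
--
--     return final_list
-- ===== SOURCE B (Python) =====
-- def count_max_adjacent_consonants(my_string):
--     no_spaces = my_string.replace(' ', '')
--
--     adj_consonant_tracker = []
--     max_num_adj_consonants = 0
--
--     for char in no_spaces:
--         if char not in ['a', 'e', 'i', 'o', 'u', 'y']:
--             adj_consonant_tracker.append(char)
--             max_num_adj_consonants = len(adj_consonant_tracker)
--
--         else:
--             if len(adj_consonant_tracker) > max_num_adj_consonants:
--                 max_num_adj_consonants = len(adj_consonant_tracker)
--
--             adj_consonant_tracker.clear()
--
--     if max_num_adj_consonants > 1: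
--         return max_num_adj_consonants
--     else:
--         return 0
--
-- def sort_by_consonant_count(my_list):
--     buckets = {}
--     for string in my_list:
--         buckets.setdefault(count_max_adjacent_consonants(string), []).append(string)
--
--     final_list = []
--     for count in sorted(buckets, reverse=True):
--         final_list.extend(buckets[count])
--     return final_list
-- ===== Notes on version B (the rewrite author's own statement) =====
-- stated objective: faster
-- what changed: A's repeated max-scan selection loop (rescan and remove the first maximal item each round) is replaced by one grouping pass into a count->words dict plus a single emission over the keys sorted descending, keeping original order within equal counts.
import Mathlib
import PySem

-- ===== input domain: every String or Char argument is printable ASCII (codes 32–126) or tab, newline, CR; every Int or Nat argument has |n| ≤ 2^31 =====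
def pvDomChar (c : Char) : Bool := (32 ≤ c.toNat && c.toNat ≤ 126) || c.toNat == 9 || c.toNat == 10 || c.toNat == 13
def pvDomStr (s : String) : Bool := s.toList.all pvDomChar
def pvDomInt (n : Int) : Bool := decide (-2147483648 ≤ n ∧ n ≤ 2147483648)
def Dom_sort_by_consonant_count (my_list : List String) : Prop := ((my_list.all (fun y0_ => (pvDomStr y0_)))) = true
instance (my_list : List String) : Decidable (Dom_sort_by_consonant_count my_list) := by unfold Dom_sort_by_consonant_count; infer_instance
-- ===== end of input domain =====

-- B replaces A's quadratic repeated max-scan selection loop by one grouping pass into a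
-- count→words dict plus one emission over the keys sorted descending (objective: faster).

-- ===== PORT A =====
-- shared helper: count_max_adjacent_consonants (identical in Source A and Source B)
def pvCount (my_string : String) : Int :=
  let no_spaces := (PySem.Str.replace my_string " " "").toList
  let fin : List Char × Int := no_spaces.foldl
    (fun (st : List Char × Int) ch =>
      if ch ∉ ['a', 'e', 'i', 'o', 'u', 'y'] then
        (st.1 ++ [ch], ((st.1 ++ [ch]).length : Int))
      else
        ([], if (st.1.length : Int) > st.2 then (st.1.length : Int) else st.2))
    ([], 0)
  if fin.2 > 1 then fin.2 else 0

-- the `for item in tracking_list` max-scan (word_to_add/max_adj_cons_tracker accumulator)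
def pvSelect (tracking : List (Int × String)) : Int × String :=
  tracking.foldl (fun st item => if item.1 > st.1 then item else st) (-1, "")

-- the `while tracking_list:` loop, fuelled by the list length (each pass removes one item)
def pvSelLoop : Nat → List (Int × String) → List String
  | 0, _ => []
  | fuel + 1, tracking =>
    if tracking = [] then []
    else
      let sel := pvSelect tracking
      sel.2 :: pvSelLoop fuel ((PySem.List.remove? tracking sel).getD tracking)

def sort_by_consonant_count (my_list : List String) : List String :=
  let tracking := my_list.foldl (fun acc s => acc ++ [(pvCount s, s)]) []
  pvSelLoop tracking.length tracking

-- ===== PORT B =====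
def sort_by_consonant_count_alt (my_list : List String) : List String :=
  let buckets : PySem.Dict Int (List String) :=
    my_list.foldl (fun d s => d.modify (pvCount s) [] (fun ws => ws ++ [s])) PySem.Dict.empty
  (PySem.List.sorted buckets.keys (fun k => k) true).foldl
    (fun acc k => acc ++ buckets.getD k []) []

-- ===== PRECONDITION & SPEC =====
def Spec_sort_by_consonant_count (my_list : List String) (out : List String) : Prop := out = sort_by_consonant_count_alt my_list
instance (my_list : List String) (out : List String) : Decidable (Spec_sort_by_consonant_count my_list out) := by unfold Spec_sort_by_consonant_count; infer_instance

-- ===== CLAIM (what is proved, stated in full; the proofs are below) =====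
def Claim_equal_sort_by_consonant_count : Prop := ∀ (my_list : List String), Dom_sort_by_consonant_count my_list → Spec_sort_by_consonant_count my_list (sort_by_consonant_count my_list)

-- ===== LEMMAS AND PROOFS =====

theorem pvCount_nonneg (s : String) : 0 ≤ pvCount s := by
  unfold pvCount
  dsimp only
  split <;> omega

-- the max-scan fold keeps its state when no item beats it
theorem pvFold_stay (l : List (Int × String)) (st : Int × String)
    (h : ∀ y ∈ l, y.1 ≤ st.1) :
    l.foldl (fun st it => if it.1 > st.1 then it else st) st = st := by
  induction l with
  | nil => rfl
  | cons x t ih =>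
    have hx : ¬ x.1 > st.1 := by have := h x (by simp); omega
    simpa [hx] using ih (fun y hy => h y (by simp [hy]))

theorem pvFold_mem_or_eq (l : List (Int × String)) (st : Int × String) :
    l.foldl (fun st it => if it.1 > st.1 then it else st) st = st ∨
    l.foldl (fun st it => if it.1 > st.1 then it else st) st ∈ l := by
  induction l generalizing st with
  | nil => left; rfl
  | cons x t ih =>
    simp only [List.foldl_cons]
    rcases ih (if x.1 > st.1 then x else st) with h | h
    · rw [h]
      split
      · right; simp
      · left; rfl
    · right; simp [h]

-- the scan returns the FIRST item of maximal key
theorem pvFold_first (l1 l2 : List (Int × String)) (x st : Int × String)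
    (h1 : ∀ y ∈ l1, y.1 < x.1) (h2 : ∀ y ∈ l2, y.1 ≤ x.1) (hst : st.1 < x.1) :
    (l1 ++ x :: l2).foldl (fun st it => if it.1 > st.1 then it else st) st = x := by
  rw [List.foldl_append]
  have hm : (l1.foldl (fun st it => if it.1 > st.1 then it else st) st).1 < x.1 := by
    rcases pvFold_mem_or_eq l1 st with h | h
    · rw [h]; exact hst
    · exact h1 _ h
  simp only [List.foldl_cons]
  rw [if_pos (by omega)]
  exact pvFold_stay l2 x h2

theorem pvRemove_mem (l : List (Int × String)) (x : Int × String) (h : x ∈ l) :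
    PySem.List.remove? l x = some (l.erase x) := by
  simp only [PySem.List.remove?]
  rcases h' : List.idxOf? x l with _ | k
  · rw [List.idxOf?_eq_none_iff] at h'; exact absurd h (by simpa using h')
  · simp [List.erase_eq_eraseIdx, h']

-- descending sort of a duplicate-free key list is strictly descending
theorem pvSortedDesc_pairwise_gt (s : List Int) (h : s.Nodup) :
    (PySem.List.sorted s (fun x => x) true).Pairwise (fun a b => b < a) := by
  have h1 := PySem.List.sorted_pairwise_rev s (fun x => x)
  have h2 : (PySem.List.sorted s (fun x => x) true).Nodup :=
    ((PySem.List.sorted_perm s (fun x => x) true).nodup_iff).mpr h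
  have := List.Pairwise.and h1 h2
  exact this.imp (fun hab => lt_of_le_of_ne hab.1 (Ne.symm hab.2))

-- descending sort of the distinct keys depends only on the key SET
theorem pvSortedDesc_congr (ks ks' : List Int) (h : ∀ k, k ∈ ks ↔ k ∈ ks') :
    PySem.List.sorted (PySem.Set.ofList ks) (fun x => x) true =
    PySem.List.sorted (PySem.Set.ofList ks') (fun x => x) true := by
  apply PySem.List.sorted_rev_eq_of_perm_of_pairwise_gt
  · refine (PySem.List.sorted_perm _ _ true).trans ?_
    rw [List.perm_ext_iff_of_nodup (PySem.Set.nodup_ofList _) (PySem.Set.nodup_ofList _)]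
    intro a
    rw [PySem.Set.mem_ofList, PySem.Set.mem_ofList, h]
  · exact pvSortedDesc_pairwise_gt _ (PySem.Set.nodup_ofList _)

-- peeling the maximum off the descending sort of the distinct keys
theorem pvSortedDesc_cons_max (ks : List Int) (M : Int) (hM : M ∈ ks)
    (hmax : ∀ k ∈ ks, k ≤ M) :
    PySem.List.sorted (PySem.Set.ofList ks) (fun x => x) true =
    M :: PySem.List.sorted (PySem.Set.ofList (ks.filter (fun k => k != M))) (fun x => x) true := by
  have hTperm := PySem.List.sorted_perm (PySem.Set.ofList (ks.filter (fun k => k != M))) (fun x : Int => x) true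
  set T := PySem.List.sorted (PySem.Set.ofList (ks.filter (fun k => k != M))) (fun x : Int => x) true with hT
  have hTmem : ∀ a, a ∈ T ↔ (a ∈ ks ∧ a ≠ M) := by
    intro a
    rw [hTperm.mem_iff, PySem.Set.mem_ofList]
    simp [List.mem_filter]
  have hTnodup : T.Nodup := hTperm.nodup_iff.mpr (PySem.Set.nodup_ofList _)
  apply PySem.List.sorted_rev_eq_of_perm_of_pairwise_gt
  · have hnd : (M :: T).Nodup :=
      List.nodup_cons.mpr ⟨fun h => ((hTmem M).mp h).2 rfl, hTnodup⟩
    rw [List.perm_ext_iff_of_nodup hnd (PySem.Set.nodup_ofList _)]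
    intro a
    rw [List.mem_cons, hTmem, PySem.Set.mem_ofList]
    constructor
    · rintro (rfl | ⟨h, _⟩)
      · exact hM
      · exact h
    · intro ha
      by_cases haM : a = M
      · exact Or.inl haM
      · exact Or.inr ⟨ha, haM⟩
  · refine List.Pairwise.cons (fun y hy => ?_) (pvSortedDesc_pairwise_gt _ (PySem.Set.nodup_ofList _))
    have hmemy := (hTmem y).mp hy
    exact lt_of_le_of_ne (hmax _ hmemy.1) hmemy.2

-- keys of a pair list
theorem pvKeys_sub (l1 l2 : List (Int × String)) (x : Int × String) (k : Int)
    (h : k ∈ (l1 ++ l2).map (fun p => p.1)) :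
    k ∈ (l1 ++ x :: l2).map (fun p => p.1) := by
  simp only [List.map_append, List.mem_append, List.map_cons, List.mem_cons] at h ⊢
  tauto

-- A's selection loop equals the bucket emission over the descending distinct keys
theorem pvSelLoop_eq (n : Nat) : ∀ (l : List (Int × String)), l.length = n →
    (∀ p ∈ l, 0 ≤ p.1) →
    pvSelLoop n l =
      (PySem.List.sorted (PySem.Set.ofList (l.map (fun p => p.1))) (fun k => k) true).flatMap
        (fun k => (l.filter (fun p => p.1 == k)).map (fun p => p.2)) := by
  induction n with
  | zero =>
    intro l hl _
    rw [List.length_eq_zero_iff.mp hl]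
    rfl
  | succ n ih =>
    intro l hl hpos
    have hne : l ≠ [] := by
      intro h; rw [h] at hl; simp at hl
    obtain ⟨M, hMmem, hMmax⟩ : ∃ M, M ∈ l.map (fun p => p.1) ∧
        ∀ k ∈ l.map (fun p => p.1), k ≤ M := by
      rcases h : (l.map (fun p => p.1)).max? with _ | M
      · rw [List.max?_eq_none_iff] at h
        exact absurd (List.map_eq_nil_iff.mp h) hne
      · exact ⟨M, List.max?_mem h, fun k hk => ((List.max?_le_iff h).mp le_rfl) k hk⟩
    -- split l at its first element of maximal key
    have hsplit : l.takeWhile (fun y => y.1 != M) ++ l.dropWhile (fun y => y.1 != M) = l :=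
      List.takeWhile_append_dropWhile
    set l1 := l.takeWhile (fun y => y.1 != M) with hl1
    have h1 : ∀ y ∈ l1, y.1 < M := by
      intro y hy
      have hyp := List.mem_takeWhile_imp hy
      have hyl : y ∈ l := by
        rw [← hsplit]; exact List.mem_append_left _ hy
      have hle := hMmax y.1 (List.mem_map_of_mem hyl)
      rw [bne_iff_ne] at hyp
      omega
    have hrne : l.dropWhile (fun y => y.1 != M) ≠ [] := by
      intro h
      obtain ⟨q, hq, hq1⟩ := List.mem_map.mp hMmem
      have hql1 : q ∈ l1 := by
        have hll : l1 = l := by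
          have := hsplit
          rwa [h, List.append_nil] at this
        show q ∈ l1
        rw [hll]; exact hq
      have := h1 q hql1
      omega
    obtain ⟨x, l2, hr⟩ := List.exists_cons_of_ne_nil hrne
    have hx1 : x.1 = M := by
      have hfalse := List.head_dropWhile_not (fun y : Int × String => y.1 != M) (l := l)
        (by simp [hr])
      simp only [hr, List.head_cons, ] at hfalse
      simpa using hfalse
    have hldecomp : l = l1 ++ x :: l2 := by rw [← hsplit, hr]
    have h2 : ∀ y ∈ l2, y.1 ≤ M := by
      intro y hy
      exact hMmax y.1 (List.mem_map_of_mem (by rw [hldecomp]; simp [hy]))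
    have hxl : x ∈ l := by rw [hldecomp]; simp
    have hx0 : 0 ≤ x.1 := hpos x hxl
    -- the max scan picks x
    have hsel : pvSelect l = x := by
      unfold pvSelect
      rw [hldecomp]
      exact pvFold_first l1 l2 x (-1, "") (by intro y hy; rw [hx1]; exact h1 y hy)
        (by intro y hy; rw [hx1]; exact h2 y hy) (by simp; omega)
    have hxnotl1 : x ∉ l1 := by
      intro hmem
      have := h1 x hmem
      omega
    have hrem : (PySem.List.remove? l x).getD l = l1 ++ l2 := by
      rw [pvRemove_mem l x hxl, Option.getD_some, hldecomp,
        List.erase_append_right _ hxnotl1, List.erase_cons_head]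
    have hstep : pvSelLoop (n + 1) l = x.2 :: pvSelLoop n (l1 ++ l2) := by
      rw [pvSelLoop, if_neg hne]
      dsimp only
      rw [hsel, hrem]
    have hlen : (l1 ++ l2).length = n := by
      have := congrArg List.length hldecomp
      simp only [List.length_append, List.length_cons] at this
      simp only [List.length_append]
      omega
    have hpos' : ∀ q ∈ l1 ++ l2, 0 ≤ q.1 := by
      intro q hq
      refine hpos q ?_
      rw [hldecomp]
      rcases List.mem_append.mp hq with h | h
      · exact List.mem_append_left _ h
      · exact List.mem_append_right _ (List.mem_cons_of_mem _ h)
    rw [hstep, ih _ hlen hpos']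
    -- bucket side
    have hcons := pvSortedDesc_cons_max (l.map (fun p => p.1)) M hMmem hMmax
    rw [hcons, List.flatMap_cons]
    have hfM : l.filter (fun p => p.1 == M) = x :: (l1 ++ l2).filter (fun p => p.1 == M) := by
      rw [hldecomp, List.filter_append, List.filter_append, List.filter_cons]
      have he : l1.filter (fun p => p.1 == M) = [] := by
        rw [List.filter_eq_nil_iff]
        intro y hy
        have := h1 y hy
        simp only [beq_iff_eq]
        omega
      simp [he, hx1]
    have hgcong : ∀ k, k ≠ M →
        l.filter (fun p => p.1 == k) = (l1 ++ l2).filter (fun p => p.1 == k) := by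
      intro k hk
      rw [hldecomp, List.filter_append, List.filter_append, List.filter_cons]
      have : (x.1 == k) = false := by
        simp only [beq_eq_false_iff_ne, hx1]
        exact fun h => hk h.symm
      simp [this]
    have hTne : ∀ k ∈ PySem.List.sorted
        (PySem.Set.ofList ((l.map (fun p => p.1)).filter (fun k => k != M))) (fun x => x) true,
        k ≠ M := by
      intro k hk
      have := (PySem.List.sorted_perm _ (fun x : Int => x) true).mem_iff.mp hk
      have := (PySem.Set.mem_ofList _ _).mp this
      simp only [List.mem_filter, bne_iff_ne] at this
      exact this.2
    by_cases hMin : M ∈ (l1 ++ l2).map (fun p => p.1)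
    · have hmax' : ∀ k ∈ (l1 ++ l2).map (fun p => p.1), k ≤ M := by
        intro k hk
        exact hMmax k (by rw [hldecomp]; exact pvKeys_sub l1 l2 x k hk)
      have hcons' := pvSortedDesc_cons_max ((l1 ++ l2).map (fun p => p.1)) M hMin hmax'
      rw [hcons', List.flatMap_cons]
      have hkeyiff : ∀ k, k ∈ ((l1 ++ l2).map (fun p => p.1)).filter (fun k => k != M) ↔
          k ∈ (l.map (fun p => p.1)).filter (fun k => k != M) := by
        intro k
        simp only [List.mem_filter, bne_iff_ne, hldecomp, List.map_append, List.mem_append,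
          List.map_cons, List.mem_cons, hx1]
        tauto
      have hTT := pvSortedDesc_congr _ _ hkeyiff
      rw [hTT, hfM]
      simp only [List.map_cons, List.cons_append]
      congr 1
      congr 1
      refine List.flatMap_congr (fun k hk => ?_)
      rw [hgcong k (hTne k hk)]
    · have hfM' : (l1 ++ l2).filter (fun p => p.1 == M) = [] := by
        rw [List.filter_eq_nil_iff]
        intro y hy
        simp only [beq_iff_eq]
        intro hy1
        exact hMin (by rw [← hy1]; exact List.mem_map_of_mem hy)
      have hkeyiff : ∀ k, k ∈ (l1 ++ l2).map (fun p => p.1) ↔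
          k ∈ (l.map (fun p => p.1)).filter (fun k => k != M) := by
        intro k
        simp only [List.mem_filter, bne_iff_ne, hldecomp, List.map_append, List.mem_append,
          List.map_cons, List.mem_cons, hx1]
        constructor
        · intro h
          refine ⟨by tauto, ?_⟩
          intro hkM
          rw [hkM] at h
          exact hMin (by simpa [List.map_append] using h)
        · rintro ⟨(h | h | h), hkM⟩
          · tauto
          · exact absurd h hkM
          · tauto
      have hDS := pvSortedDesc_congr _ _ hkeyiff
      rw [hDS, hfM, hfM']
      simp only [List.map_cons, List.map_nil, List.cons_append, List.nil_append]
      congr 1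
      refine List.flatMap_congr (fun k hk => ?_)
      rw [hgcong k (hTne k hk)]

-- ===== VERDICT (by name: the statement is the Claim_ definition above) =====
theorem sort_by_consonant_count_spec : Claim_equal_sort_by_consonant_count := by
  intro my_list _
  unfold Spec_sort_by_consonant_count sort_by_consonant_count sort_by_consonant_count_alt
  dsimp only
  rw [PySem.List.foldl_append_singleton_eq_map, List.nil_append]
  rw [pvSelLoop_eq _ _ rfl (by
    intro p hp
    obtain ⟨s, _, rfl⟩ := List.mem_map.mp hp
    exact pvCount_nonneg s)]
  rw [PySem.List.foldl_append_eq_flatMap, List.nil_append]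
  have hb : my_list.foldl (fun d s => d.modify (pvCount s) [] (fun ws => ws ++ [s]))
        PySem.Dict.empty
      = (my_list.map (fun s => (pvCount s, s))).foldl
          (fun d p => d.modify p.1 [] (fun ws => ws ++ [p.2])) PySem.Dict.empty := by
    rw [List.foldl_map]
  rw [hb, PySem.Dict.keys_foldl_modify_key, PySem.Dict.keys_empty, PySem.Set.update_nil_left]
  refine List.flatMap_congr (fun k _ => ?_)
  rw [PySem.Dict.getD_foldl_modify_append, PySem.Dict.getD_empty, List.nil_append]
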